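-- pv_equiv track=rewrite | github.com/SkiddieAhn/Study-Scene-aware-VAD | util.py | convert_clip_labels
-- ===== SOURCE A (Python) =====
-- def convert_clip_labels(labels, clip_length):
--     clip_labels = []
--     total_frames = len(labels)
--     num_clips = total_frames // clip_length
--
--     for i in range(num_clips):
--         clip = labels[i * clip_length:(i + 1) * clip_length]
--         clip_label = 1 if any(clip) else 0
--         clip_labels.append(clip_label)
--
--     return clip_labels
-- ===== SOURCE B (Python) =====
-- def convert_clip_labels(labels, clip_length):
--     num_clips = len(labels) // clip_length
--     result = [0] * num_clips
--     for i in range(len(result) * clip_length):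
--         if labels[i]:
--             result[i // clip_length] = 1
--     return result
-- ===== Notes on version B (the rewrite author's own statement) =====
-- stated objective: alternative
-- what changed: B preallocates the clip vector and scatters each truthy frame into its clip bucket (result[i // clip_length] = 1) in one flat pass over the covered frames, instead of slicing out each clip and calling any() on it.
import Mathlib
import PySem

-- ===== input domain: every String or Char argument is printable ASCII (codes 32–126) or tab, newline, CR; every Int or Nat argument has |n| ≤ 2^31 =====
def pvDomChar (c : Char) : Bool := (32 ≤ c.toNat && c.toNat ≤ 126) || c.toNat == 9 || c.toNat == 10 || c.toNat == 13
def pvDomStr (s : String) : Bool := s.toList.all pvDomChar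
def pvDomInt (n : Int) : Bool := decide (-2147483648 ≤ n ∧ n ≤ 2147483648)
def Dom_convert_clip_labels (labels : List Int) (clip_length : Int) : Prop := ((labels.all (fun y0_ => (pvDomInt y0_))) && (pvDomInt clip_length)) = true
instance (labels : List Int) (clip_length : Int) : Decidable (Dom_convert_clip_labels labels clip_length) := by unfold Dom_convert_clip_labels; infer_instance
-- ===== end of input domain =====

-- B scatters each truthy frame into its clip bucket in one flat pass instead of slicing each clip and testing any(); alternative decomposition, same O(n) cost.


-- ===== PORT A =====
def convert_clip_labels (labels : List Int) (clip_length : Int) : List Int :=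
  let total_frames : Int := labels.length
  let num_clips := PySem.Int.floordiv total_frames clip_length
  (PySem.List.pyRange 0 num_clips 1).foldl (fun clip_labels i =>
    let clip := PySem.List.slice labels (some (i * clip_length)) (some ((i + 1) * clip_length))
    let clip_label : Int := if clip.any (fun x => decide (x ≠ 0)) then 1 else 0
    clip_labels ++ [clip_label]) []

-- ===== PORT B =====
def convert_clip_labels_alt (labels : List Int) (clip_length : Int) : List Int :=
  let num_clips := PySem.Int.floordiv (labels.length : Int) clip_length
  let result : List Int := List.replicate num_clips.toNat 0
  (PySem.List.pyRange 0 ((result.length : Int) * clip_length) 1).foldl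
    (fun result i =>
      if PySem.List.pyGetD labels i 0 ≠ 0 then
        PySem.List.pySetD result (PySem.Int.floordiv i clip_length) 1
      else result) result

-- ===== PRECONDITION & SPEC =====
-- Pre_ excludes exactly clip_length = 0, where Python A raises ZeroDivisionError.
def Pre_convert_clip_labels (labels : List Int) (clip_length : Int) : Prop := clip_length ≠ 0
instance (labels : List Int) (clip_length : Int) : Decidable (Pre_convert_clip_labels labels clip_length) := by unfold Pre_convert_clip_labels; infer_instance
def pvWitness_convert_clip_labels : List Int × Int := ([0, 1, 0, 0, 2], 2)

def Spec_convert_clip_labels (labels : List Int) (clip_length : Int) (out : List Int) : Prop := out = convert_clip_labels_alt labels clip_length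
instance (labels : List Int) (clip_length : Int) (out : List Int) : Decidable (Spec_convert_clip_labels labels clip_length out) := by unfold Spec_convert_clip_labels; infer_instance

-- ===== CLAIM (what is proved, stated in full; the proofs are below) =====
def Claim_equal_convert_clip_labels : Prop := ∀ (labels : List Int) (clip_length : Int), Dom_convert_clip_labels labels clip_length → Pre_convert_clip_labels labels clip_length → Spec_convert_clip_labels labels clip_length (convert_clip_labels labels clip_length)


-- ===== LEMMAS AND PROOFS =====

-- per-clip value after the first t frames have been scattered: 1 iff some already-seen frame of clip j is nonzero
def pvF (labels : List Int) (k t j : Nat) : Int :=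
  if ∃ i < t, j*k ≤ i ∧ i < j*k + k ∧ labels.getD i 0 ≠ 0 then 1 else 0

theorem pvF_zero (labels : List Int) (k j : Nat) : pvF labels k 0 j = 0 := by
  simp [pvF]

theorem pv_div_block {t k j : Nat} (hk : 0 < k) :
    j = t / k ↔ (j*k ≤ t ∧ t < j*k + k) := by
  constructor
  · rintro rfl
    obtain h1 := Nat.div_add_mod t k
    obtain h2 := Nat.mod_lt t hk
    have h3 : t / k * k = k * (t / k) := Nat.mul_comm _ _
    constructor <;> omega
  · rintro ⟨h1, h2⟩
    have ha : j ≤ t / k := (Nat.le_div_iff_mul_le hk).2 h1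
    have hr : (j + 1) * k = j * k + k := by ring
    have hb : t / k < j + 1 := (Nat.div_lt_iff_lt_mul hk).2 (by omega)
    omega

theorem pv_inv (labels : List Int) (k m : Nat) (hk : 0 < k) :
    ∀ t, t ≤ m*k →
      (PySem.List.pyRange 0 (t : Int) 1).foldl
        (fun result i =>
          if PySem.List.pyGetD labels i 0 ≠ 0 then
            PySem.List.pySetD result (PySem.Int.floordiv i (k : Int)) 1
          else result) (List.replicate m (0:Int))
      = (List.range m).map (pvF labels k t) := by
  intro t
  induction t with
  | zero =>
    intro _
    rw [PySem.List.pyRange_one_eq_nil (by norm_num)]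
    have h0 : List.map (pvF labels k 0) (List.range m) = List.map (fun _ => (0:Int)) (List.range m) :=
      List.map_congr_left (fun j _ => pvF_zero labels k j)
    rw [List.foldl_nil, h0, List.map_const', List.length_range]
  | succ t ih =>
    intro ht
    have ht' : t ≤ m*k := by omega
    have htmk : t < m*k := by omega
    have hcast : ((t + 1 : Nat) : Int) = (t : Int) + 1 := by push_cast; ring
    rw [hcast, PySem.List.pyRange_one_succ_right (by positivity), List.foldl_append, ih ht']
    simp only [List.foldl_cons, List.foldl_nil]
    rw [PySem.List.pyGetD_natCast]
    by_cases hv : labels.getD t 0 ≠ 0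
    · rw [if_pos hv, PySem.Int.floordiv_natCast, PySem.List.pySetD_natCast]
      have hdk : t / k < m := (Nat.div_lt_iff_lt_mul hk).2 htmk
      apply List.ext_getElem
      · simp
      · intro j hj1 hj2
        have hjm : j < m := by simpa using hj2
        simp only [List.getElem_set, List.getElem_map, List.getElem_range]
        by_cases hje : t / k = j
        · rw [if_pos hje]
          have hblk : j*k ≤ t ∧ t < j*k + k := (pv_div_block hk).1 hje.symm
          have : ∃ i < t + 1, j*k ≤ i ∧ i < j*k + k ∧ labels.getD i 0 ≠ 0 :=
            ⟨t, by omega, hblk.1, hblk.2, hv⟩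
          simp only [pvF]
          rw [if_pos this]
        · rw [if_neg hje]
          have hiff : (∃ i < t + 1, j*k ≤ i ∧ i < j*k + k ∧ labels.getD i 0 ≠ 0) ↔
              (∃ i < t, j*k ≤ i ∧ i < j*k + k ∧ labels.getD i 0 ≠ 0) := by
            constructor
            · rintro ⟨i, hi, h1, h2, h3⟩
              rcases Nat.lt_or_ge i t with hlt | hge
              · exact ⟨i, hlt, h1, h2, h3⟩
              · have hit : i = t := by omega
                subst hit
                exact absurd ((pv_div_block hk).2 ⟨h1, h2⟩).symm hje
            · rintro ⟨i, hi, h1, h2, h3⟩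
              exact ⟨i, by omega, h1, h2, h3⟩
          simp only [pvF]
          rw [if_congr hiff rfl rfl]
    · rw [if_neg hv]
      apply List.map_congr_left
      intro j hj
      have hiff : (∃ i < t + 1, j*k ≤ i ∧ i < j*k + k ∧ labels.getD i 0 ≠ 0) ↔
          (∃ i < t, j*k ≤ i ∧ i < j*k + k ∧ labels.getD i 0 ≠ 0) := by
        constructor
        · rintro ⟨i, hi, h1, h2, h3⟩
          rcases Nat.lt_or_ge i t with hlt | hge
          · exact ⟨i, hlt, h1, h2, h3⟩
          · have hit : i = t := by omega
            subst hit
            exact absurd h3 (by simpa using hv)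
        · rintro ⟨i, hi, h1, h2, h3⟩
          exact ⟨i, by omega, h1, h2, h3⟩
      simp only [pvF]
      rw [if_congr hiff rfl rfl]

-- A's per-clip slice test equals pvF at t = m*k, for clips inside range
theorem pv_clip_eq (labels : List Int) (k m j : Nat) (hk : 0 < k)
    (hmk : m*k ≤ labels.length) (hj : j < m) :
    (if ((labels.drop (j*k)).take k).any (fun x => decide (x ≠ 0)) then (1:Int) else 0)
      = pvF labels k (m*k) j := by
  have hjk : j*k + k ≤ labels.length := by
    have h5 : (j+1)*k ≤ m*k := Nat.mul_le_mul_right k (by omega)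
    have hr : (j+1)*k = j*k + k := by ring
    omega
  have hlen : ((labels.drop (j*k)).take k).length = k := by
    simp [List.length_take, List.length_drop]
    omega
  have hiff : (((labels.drop (j*k)).take k).any (fun x => decide (x ≠ 0)) = true) ↔
      (∃ i < m*k, j*k ≤ i ∧ i < j*k + k ∧ labels.getD i 0 ≠ 0) := by
    rw [List.any_eq_true]
    constructor
    · rintro ⟨x, hmem, hx⟩
      obtain ⟨q, hq, hxe⟩ := List.mem_iff_getElem.1 hmem
      rw [hlen] at hq
      refine ⟨j*k + q, ?_, by omega, by omega, ?_⟩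
      · have h5 : (j+1)*k ≤ m*k := Nat.mul_le_mul_right k (by omega)
        have hr : (j+1)*k = j*k + k := by ring
        omega
      · have hin : j*k + q < labels.length := by omega
        have : x = labels[j*k + q] := by
          rw [← hxe]
          simp [List.getElem_take, List.getElem_drop]
        rw [List.getD_eq_getElem labels 0 hin, ← this]
        simpa using hx
    · rintro ⟨i, _, h1, h2, h3⟩
      have hin : i < labels.length := by omega
      refine ⟨labels[i], ?_, ?_⟩
      · apply List.mem_iff_getElem.2
        refine ⟨i - j*k, by omega, ?_⟩
        simp only [List.getElem_take, List.getElem_drop]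
        congr 1
        omega
      · rw [List.getD_eq_getElem labels 0 hin] at h3
        simpa using h3
  simp only [pvF]
  rw [if_congr hiff rfl rfl]

theorem pv_neg_case (labels : List Int) (c : Int) (hc : c < 0) :
    convert_clip_labels labels c = [] ∧ convert_clip_labels_alt labels c = [] := by
  have hfd : PySem.Int.floordiv (labels.length : Int) c ≤ 0 := by
    show Int.fdiv _ _ ≤ 0
    have h1 : (labels.length : Int) / c ≤ 0 :=
      Int.ediv_nonpos_of_nonneg_of_nonpos (by positivity) (le_of_lt hc)
    rw [Int.fdiv_eq_ediv]
    split_ifs <;> omega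
  constructor
  · simp only [convert_clip_labels]
    rw [PySem.List.pyRange_one_eq_nil hfd]
    rfl
  · simp only [convert_clip_labels_alt]
    rw [Int.toNat_of_nonpos hfd]
    simp only [List.replicate_zero, List.length_nil, Nat.cast_zero, zero_mul]
    rw [PySem.List.pyRange_one_eq_nil le_rfl]
    rfl

theorem pv_pos_case (labels : List Int) (c : Int) (hc : 0 < c) :
    convert_clip_labels labels c = convert_clip_labels_alt labels c := by
  set k : Nat := c.toNat with hkdef
  have hck : c = (k : Int) := by omega
  have hk : 0 < k := by omega
  set n : Nat := labels.length with hndef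
  set m : Nat := n / k with hmdef
  have hmk : m*k ≤ n := Nat.div_mul_le_self n k
  -- B's side
  have hB : convert_clip_labels_alt labels c = (List.range m).map (pvF labels k (m*k)) := by
    simp only [convert_clip_labels_alt]
    rw [hck]
    simp only [← hndef, PySem.Int.floordiv_natCast, ← hmdef, Int.toNat_natCast,
      List.length_replicate]
    have hcast : (m : Int) * (k : Int) = ((m*k : Nat) : Int) := by push_cast; ring
    rw [hcast]
    exact pv_inv labels k m hk (m*k) le_rfl
  -- A's side
  have hA : convert_clip_labels labels c
      = (List.range m).map (fun j =>
          if ((labels.drop (j*k)).take k).any (fun x => decide (x ≠ 0)) then (1:Int) else 0) := by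
    simp only [convert_clip_labels]
    rw [hck]
    simp only [← hndef, PySem.Int.floordiv_natCast, ← hmdef]
    rw [PySem.List.foldl_append_singleton_eq_map, List.nil_append]
    rw [PySem.List.pyRange_one, List.map_map]
    have hm : ((m : Int) - 0).toNat = m := by simp
    rw [hm]
    apply List.map_congr_left
    intro j hj
    simp only [Function.comp_apply, zero_add]
    have h1 : (j : Int) * (k : Int) = ((j*k : Nat) : Int) := by push_cast; ring
    have h2 : ((j : Int) + 1) * (k : Int) = ((j*k : Nat) : Int) + ((k : Nat) : Int) := by
      push_cast; ring
    rw [h1, h2, PySem.List.slice_natCast_add]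
  rw [hA, hB]
  apply List.map_congr_left
  intro j hj
  exact pv_clip_eq labels k m j hk hmk (List.mem_range.1 hj)

-- ===== VERDICT (by name: the statement is the Claim_ definition above) =====
theorem convert_clip_labels_spec : Claim_equal_convert_clip_labels := by
  intro labels c _hdom hc
  unfold Spec_convert_clip_labels
  rcases lt_trichotomy c 0 with h | h | h
  · obtain ⟨ha, hb⟩ := pv_neg_case labels c h
    rw [ha, hb]
  · exact absurd h hc
  · exact pv_pos_case labels c h
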